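-- pv_equiv track=rewrite | github.com/rodekruis/social-media-listening | pipeline/src/pipeline/utils.py | html_decode
-- ===== SOURCE A (Python) =====
-- def html_decode(row_, text_column):
--     """
--     Returns the ASCII decoded version of the given HTML string. This does
--     NOT remove normal HTML tags like <p>.
--     """
--     htmlCodes = (
--         ("'", '&#39;'),
--         ('"', '&quot;'),
--         ('>', '&gt;'),
--         ('<', '&lt;'),
--         ('&', '&amp;')
--     )
--     text = row_[text_column]
--     for code in htmlCodes:
--         text = text.replace(code[1], code[0])
--     return text
-- ===== SOURCE B (Python) =====
-- def html_decode(row_, text_column):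
--     """Single left-to-right pass: at each '&' try the five entities once;
--     five whole-string replace passes become one scan."""
--     codes = {
--         '&#39;': "'",
--         '&quot;': '"',
--         '&gt;': '>',
--         '&lt;': '<',
--         '&amp;': '&',
--     }
--     text = row_[text_column]
--     out = []
--     i = 0
--     n = len(text)
--     while i < n:
--         if text[i] == '&':
--             for ent, ch in codes.items():
--                 if text.startswith(ent, i):
--                     out.append(ch)
--                     i += len(ent)
--                     break
--             else:
--                 out.append(text[i])
--                 i += 1
--         else:
--             out.append(text[i])
--             i += 1
--     return ''.join(out)
-- ===== Notes on version B (the rewrite author's own statement) =====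
-- stated objective: alternative
-- what changed: A runs five sequential whole-string replace passes; B makes a single left-to-right scan that at each '&' tries the five entities once and copies everything else, never rescanning emitted output.
-- outside the precondition, e.g. on html_decode({}, 'text'): A raises KeyError, B raises KeyError
import Mathlib
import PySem

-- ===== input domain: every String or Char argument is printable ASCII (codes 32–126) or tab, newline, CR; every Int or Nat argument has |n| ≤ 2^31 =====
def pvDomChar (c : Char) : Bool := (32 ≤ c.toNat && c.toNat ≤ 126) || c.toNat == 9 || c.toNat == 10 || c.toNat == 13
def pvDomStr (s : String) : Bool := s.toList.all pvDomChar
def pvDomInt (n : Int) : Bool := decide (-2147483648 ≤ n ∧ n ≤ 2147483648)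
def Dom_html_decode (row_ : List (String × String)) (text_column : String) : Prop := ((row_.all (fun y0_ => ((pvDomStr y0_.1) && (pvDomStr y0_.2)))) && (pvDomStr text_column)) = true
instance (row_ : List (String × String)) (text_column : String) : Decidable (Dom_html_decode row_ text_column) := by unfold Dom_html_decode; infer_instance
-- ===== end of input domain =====

-- B makes ONE left-to-right scan trying the five entities at each '&' instead of A's five
-- sequential whole-string replace passes; same return value (neither mutates its arguments).

-- ===== PORT A =====
-- row_[text_column] is a dict lookup (first match); then the five str.replace passes in A's order.
def html_decode (row_ : List (String × String)) (text_column : String) : String :=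
  match List.lookup text_column row_ with
  | none => ""   -- unreachable under Pre_ (Python raises KeyError)
  | some text =>
    PySem.Str.replace
      (PySem.Str.replace
        (PySem.Str.replace
          (PySem.Str.replace
            (PySem.Str.replace text "&#39;" "'")
            "&quot;" "\"")
          "&gt;" ">")
        "&lt;" "<")
      "&amp;" "&"

-- ===== PORT B =====
-- B's while-loop over index i, transcribed as recursion over the remaining characters:
-- at '&' the five startswith tests in dict order (mirrors text.startswith(ent, i)),
-- otherwise copy one character.
def pvDecode : List Char → List Char
  | [] => []
  | c :: t =>
    if c = '&' then
      if List.isPrefixOf ['&','#','3','9',';'] (c :: t) then '\'' :: pvDecode (t.drop 4)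
      else if List.isPrefixOf ['&','q','u','o','t',';'] (c :: t) then '"' :: pvDecode (t.drop 5)
      else if List.isPrefixOf ['&','g','t',';'] (c :: t) then '>' :: pvDecode (t.drop 3)
      else if List.isPrefixOf ['&','l','t',';'] (c :: t) then '<' :: pvDecode (t.drop 3)
      else if List.isPrefixOf ['&','a','m','p',';'] (c :: t) then '&' :: pvDecode (t.drop 4)
      else c :: pvDecode t
    else c :: pvDecode t
termination_by l => l.length
decreasing_by all_goals (simp only [List.length_cons, List.length_drop]; omega)

def html_decode_alt (row_ : List (String × String)) (text_column : String) : String :=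
  match List.lookup text_column row_ with
  | none => ""   -- unreachable under Pre_ (Python raises KeyError)
  | some text => String.ofList (pvDecode text.toList)

-- ===== PRECONDITION & SPEC =====
-- Pre_ excludes only the inputs where Python's row_[text_column] raises KeyError.
def Pre_html_decode (row_ : List (String × String)) (text_column : String) : Prop :=
  text_column ∈ row_.map Prod.fst
instance (row_ : List (String × String)) (text_column : String) : Decidable (Pre_html_decode row_ text_column) := by unfold Pre_html_decode; infer_instance

def pvWitness_html_decode : (List (String × String)) × String := ([("text", "a &amp; b &lt;3")], "text")

def Spec_html_decode (row_ : List (String × String)) (text_column : String) (out : String) : Prop := out = html_decode_alt row_ text_column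
instance (row_ : List (String × String)) (text_column : String) (out : String) : Decidable (Spec_html_decode row_ text_column out) := by unfold Spec_html_decode; infer_instance

-- ===== CLAIM (what is proved, stated in full; the proofs are below) =====
def Claim_equal_html_decode : Prop := ∀ (row_ : List (String × String)) (text_column : String), Dom_html_decode row_ text_column → Pre_html_decode row_ text_column → Spec_html_decode row_ text_column (html_decode row_ text_column)

-- ===== LEMMAS AND PROOFS =====

-- Functional model of Python str.replace for a nonempty pattern '&'::o'
-- (what PySem.Chars.replace.go computes once the fuel is large enough).
def pvRep (o' n : List Char) : List Char → List Char
  | [] => []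
  | c :: t =>
    if List.isPrefixOf ('&' :: o') (c :: t) then n ++ pvRep o' n (t.drop o'.length)
    else c :: pvRep o' n t
termination_by l => l.length
decreasing_by all_goals (simp only [List.length_cons, List.length_drop]; omega)

theorem pvRep_cons (o' n : List Char) (c : Char) (t : List Char) :
    pvRep o' n (c :: t) =
      if List.isPrefixOf ('&' :: o') (c :: t) then n ++ pvRep o' n (t.drop o'.length)
      else c :: pvRep o' n t := by
  rw [pvRep]

theorem npre_cons_of_ne (o' : List Char) {c : Char} (t : List Char) (h : c ≠ '&') :
    List.isPrefixOf ('&' :: o') (c :: t) = false := by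
  simp only [List.isPrefixOf, Bool.and_eq_false_iff, beq_eq_false_iff_ne]
  exact Or.inl (Ne.symm h)

theorem pvRep_cons_ne (o' n : List Char) {c : Char} (t : List Char) (h : c ≠ '&') :
    pvRep o' n (c :: t) = c :: pvRep o' n t := by
  rw [pvRep_cons, npre_cons_of_ne o' t h]
  simp

theorem pvRep_cons_npre (o' n : List Char) {c : Char} {t : List Char}
    (h : List.isPrefixOf ('&' :: o') (c :: t) = false) :
    pvRep o' n (c :: t) = c :: pvRep o' n t := by
  rw [pvRep_cons, h]; simp

theorem pvRep_prefix (o' n u : List Char) :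
    pvRep o' n (('&' :: o') ++ u) = n ++ pvRep o' n u := by
  rw [show ('&' :: o') ++ u = '&' :: (o' ++ u) from rfl, pvRep_cons]
  have hp : List.isPrefixOf ('&' :: o') ('&' :: (o' ++ u)) = true := by
    simp [List.isPrefixOf_iff_prefix]
  rw [hp]
  simp

-- A single-character replacement r ∉ w never creates a new occurrence of the prefix w.
theorem pvRep_pres (o' : List Char) (r : Char) :
    ∀ t w : List Char, r ∉ w → List.isPrefixOf w t = false →
      List.isPrefixOf w (pvRep o' [r] t) = false := by
  suffices H : ∀ m, ∀ t : List Char, t.length ≤ m → ∀ w : List Char, r ∉ w →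
      List.isPrefixOf w t = false → List.isPrefixOf w (pvRep o' [r] t) = false from
    fun t w hr h => H t.length t le_rfl w hr h
  intro m
  induction m with
  | zero =>
    intro t ht w hr h
    have : t = [] := List.length_eq_zero_iff.mp (Nat.le_zero.mp ht)
    subst this
    rw [pvRep]
    exact h
  | succ m ih =>
    intro t ht w hr h
    match t with
    | [] => rw [pvRep]; exact h
    | c :: t' =>
      match w with
      | [] => simp [List.isPrefixOf] at h
      | a :: w' =>
        have har : a ≠ r := fun he => hr (by simp [he])
        rcases Bool.eq_false_or_eq_true (List.isPrefixOf ('&' :: o') (c :: t')) with hp | hp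
        · rw [pvRep_cons, hp, if_pos rfl]
          simp only [List.cons_append, List.nil_append, List.isPrefixOf,
            Bool.and_eq_false_iff, beq_eq_false_iff_ne]
          exact Or.inl har
        · rw [pvRep_cons_npre o' [r] hp]
          simp only [List.isPrefixOf, Bool.and_eq_false_iff, beq_eq_false_iff_ne] at h ⊢
          rcases h with h | h
          · exact Or.inl h
          · by_cases hac : a = c
            · exact Or.inr (ih t' (by simp at ht; omega) w'
                (fun hx => hr (by simp [hx])) h)
            · exact Or.inl hac

-- go with enough fuel computes pvRep.
theorem go_eq_pvRep (o' n : List Char) :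
    ∀ fuel (l acc : List Char), l.length ≤ fuel →
      PySem.Chars.replace.go ('&' :: o') n fuel l acc = acc.reverse ++ pvRep o' n l := by
  intro fuel
  induction fuel with
  | zero =>
    intro l acc h
    have : l = [] := List.length_eq_zero_iff.mp (Nat.le_zero.mp h)
    subst this
    rw [PySem.Chars.replace.go, pvRep]
  | succ fuel ih =>
    intro l acc h
    match l with
    | [] =>
      rw [PySem.Chars.replace.go, pvRep]
      all_goals simp
    | c :: t =>
      rw [PySem.Chars.replace.go, pvRep_cons]
      rcases Bool.eq_false_or_eq_true (List.isPrefixOf ('&' :: o') (c :: t)) with hp | hp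
      · rw [hp, if_pos rfl, if_pos rfl]
        have hd : List.drop ('&' :: o').length (c :: t) = t.drop o'.length := by
          simp [List.length_cons]
        rw [hd, ih (t.drop o'.length) (n.reverse ++ acc) (by simp at h ⊢; omega)]
        simp
      · rw [hp, if_neg Bool.false_ne_true, if_neg Bool.false_ne_true]
        rw [ih t (c :: acc) (by simp at h ⊢; omega)]
        simp

theorem replace_eq_pvRep (o' n l : List Char) :
    PySem.Chars.replace l ('&' :: o') n = pvRep o' n l := by
  rw [PySem.Chars.replace.eq_def]
  simp only [List.isEmpty_cons, Bool.false_eq_true, if_false]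
  exact go_eq_pvRep o' n l.length l [] le_rfl

-- the five passes, composed (A's order)
def pvChain (l : List Char) : List Char :=
  pvRep ['a','m','p',';'] ['&']
    (pvRep ['l','t',';'] ['<']
      (pvRep ['g','t',';'] ['>']
        (pvRep ['q','u','o','t',';'] ['"']
          (pvRep ['#','3','9',';'] ['\''] l))))

theorem pvDecode_cons (c : Char) (t : List Char) :
    pvDecode (c :: t) =
      if c = '&' then
        if List.isPrefixOf ['&','#','3','9',';'] (c :: t) then '\'' :: pvDecode (t.drop 4)
        else if List.isPrefixOf ['&','q','u','o','t',';'] (c :: t) then '"' :: pvDecode (t.drop 5)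
        else if List.isPrefixOf ['&','g','t',';'] (c :: t) then '>' :: pvDecode (t.drop 3)
        else if List.isPrefixOf ['&','l','t',';'] (c :: t) then '<' :: pvDecode (t.drop 3)
        else if List.isPrefixOf ['&','a','m','p',';'] (c :: t) then '&' :: pvDecode (t.drop 4)
        else c :: pvDecode t
      else c :: pvDecode t := by
  rw [pvDecode]

theorem pvRep_nil (o' n : List Char) : pvRep o' n [] = [] := by rw [pvRep]

theorem prefix1 (X : List Char) :
    pvRep ['#','3','9',';'] ['\''] ('&'::'#'::'3'::'9'::';'::X) = '\'' :: pvRep ['#','3','9',';'] ['\''] X := by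
  have h := pvRep_prefix ['#','3','9',';'] ['\''] X
  simpa using h

theorem prefix2 (X : List Char) :
    pvRep ['q','u','o','t',';'] ['"'] ('&'::'q'::'u'::'o'::'t'::';'::X) = '"' :: pvRep ['q','u','o','t',';'] ['"'] X := by
  have h := pvRep_prefix ['q','u','o','t',';'] ['"'] X
  simpa using h

theorem prefix3 (X : List Char) :
    pvRep ['g','t',';'] ['>'] ('&'::'g'::'t'::';'::X) = '>' :: pvRep ['g','t',';'] ['>'] X := by
  have h := pvRep_prefix ['g','t',';'] ['>'] X
  simpa using h

theorem prefix4 (X : List Char) :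
    pvRep ['l','t',';'] ['<'] ('&'::'l'::'t'::';'::X) = '<' :: pvRep ['l','t',';'] ['<'] X := by
  have h := pvRep_prefix ['l','t',';'] ['<'] X
  simpa using h

theorem prefix5 (X : List Char) :
    pvRep ['a','m','p',';'] ['&'] ('&'::'a'::'m'::'p'::';'::X) = '&' :: pvRep ['a','m','p',';'] ['&'] X := by
  have h := pvRep_prefix ['a','m','p',';'] ['&'] X
  simpa using h

theorem chain_cons_ne {c : Char} (t : List Char) (h : c ≠ '&') :
    pvChain (c :: t) = c :: pvChain t := by
  unfold pvChain
  rw [pvRep_cons_ne _ _ _ h, pvRep_cons_ne _ _ _ h, pvRep_cons_ne _ _ _ h,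
    pvRep_cons_ne _ _ _ h, pvRep_cons_ne _ _ _ h]

theorem chain1 (u : List Char) :
    pvChain ('&'::'#'::'3'::'9'::';'::u) = '\'' :: pvChain u := by
  unfold pvChain
  rw [prefix1, pvRep_cons_ne _ _ _ (by decide : '\'' ≠ '&'),
    pvRep_cons_ne _ _ _ (by decide : '\'' ≠ '&'), pvRep_cons_ne _ _ _ (by decide : '\'' ≠ '&'),
    pvRep_cons_ne _ _ _ (by decide : '\'' ≠ '&')]

theorem chain2 (u : List Char) :
    pvChain ('&'::'q'::'u'::'o'::'t'::';'::u) = '"' :: pvChain u := by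
  have n1 : ∀ X : List Char, List.isPrefixOf ['&','#','3','9',';'] ('&'::'q'::'u'::'o'::'t'::';'::X) = false :=
    fun X => by simp [List.isPrefixOf]
  unfold pvChain
  rw [pvRep_cons_npre _ _ (n1 u),
    pvRep_cons_ne _ _ _ (by decide : 'q' ≠ '&'), pvRep_cons_ne _ _ _ (by decide : 'u' ≠ '&'),
    pvRep_cons_ne _ _ _ (by decide : 'o' ≠ '&'), pvRep_cons_ne _ _ _ (by decide : 't' ≠ '&'),
    pvRep_cons_ne _ _ _ (by decide : ';' ≠ '&'),
    prefix2,
    pvRep_cons_ne _ _ _ (by decide : '"' ≠ '&'), pvRep_cons_ne _ _ _ (by decide : '"' ≠ '&'),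
    pvRep_cons_ne _ _ _ (by decide : '"' ≠ '&')]

theorem chain3 (u : List Char) :
    pvChain ('&'::'g'::'t'::';'::u) = '>' :: pvChain u := by
  have n1 : ∀ X : List Char, List.isPrefixOf ['&','#','3','9',';'] ('&'::'g'::'t'::';'::X) = false :=
    fun X => by simp [List.isPrefixOf]
  have n2 : ∀ X : List Char, List.isPrefixOf ['&','q','u','o','t',';'] ('&'::'g'::'t'::';'::X) = false :=
    fun X => by simp [List.isPrefixOf]
  unfold pvChain
  rw [pvRep_cons_npre _ _ (n1 u),
    pvRep_cons_ne _ _ _ (by decide : 'g' ≠ '&'), pvRep_cons_ne _ _ _ (by decide : 't' ≠ '&'),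
    pvRep_cons_ne _ _ _ (by decide : ';' ≠ '&'),
    pvRep_cons_npre _ _ (n2 _),
    pvRep_cons_ne _ _ _ (by decide : 'g' ≠ '&'), pvRep_cons_ne _ _ _ (by decide : 't' ≠ '&'),
    pvRep_cons_ne _ _ _ (by decide : ';' ≠ '&'),
    prefix3,
    pvRep_cons_ne _ _ _ (by decide : '>' ≠ '&'), pvRep_cons_ne _ _ _ (by decide : '>' ≠ '&')]

theorem chain4 (u : List Char) :
    pvChain ('&'::'l'::'t'::';'::u) = '<' :: pvChain u := by
  have n1 : ∀ X : List Char, List.isPrefixOf ['&','#','3','9',';'] ('&'::'l'::'t'::';'::X) = false :=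
    fun X => by simp [List.isPrefixOf]
  have n2 : ∀ X : List Char, List.isPrefixOf ['&','q','u','o','t',';'] ('&'::'l'::'t'::';'::X) = false :=
    fun X => by simp [List.isPrefixOf]
  have n3 : ∀ X : List Char, List.isPrefixOf ['&','g','t',';'] ('&'::'l'::'t'::';'::X) = false :=
    fun X => by simp [List.isPrefixOf]
  unfold pvChain
  rw [pvRep_cons_npre _ _ (n1 u),
    pvRep_cons_ne _ _ _ (by decide : 'l' ≠ '&'), pvRep_cons_ne _ _ _ (by decide : 't' ≠ '&'),
    pvRep_cons_ne _ _ _ (by decide : ';' ≠ '&'),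
    pvRep_cons_npre _ _ (n2 _),
    pvRep_cons_ne _ _ _ (by decide : 'l' ≠ '&'), pvRep_cons_ne _ _ _ (by decide : 't' ≠ '&'),
    pvRep_cons_ne _ _ _ (by decide : ';' ≠ '&'),
    pvRep_cons_npre _ _ (n3 _),
    pvRep_cons_ne _ _ _ (by decide : 'l' ≠ '&'), pvRep_cons_ne _ _ _ (by decide : 't' ≠ '&'),
    pvRep_cons_ne _ _ _ (by decide : ';' ≠ '&'),
    prefix4,
    pvRep_cons_ne _ _ _ (by decide : '<' ≠ '&')]

theorem chain5 (u : List Char) :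
    pvChain ('&'::'a'::'m'::'p'::';'::u) = '&' :: pvChain u := by
  have n1 : ∀ X : List Char, List.isPrefixOf ['&','#','3','9',';'] ('&'::'a'::'m'::'p'::';'::X) = false :=
    fun X => by simp [List.isPrefixOf]
  have n2 : ∀ X : List Char, List.isPrefixOf ['&','q','u','o','t',';'] ('&'::'a'::'m'::'p'::';'::X) = false :=
    fun X => by simp [List.isPrefixOf]
  have n3 : ∀ X : List Char, List.isPrefixOf ['&','g','t',';'] ('&'::'a'::'m'::'p'::';'::X) = false :=
    fun X => by simp [List.isPrefixOf]
  have n4 : ∀ X : List Char, List.isPrefixOf ['&','l','t',';'] ('&'::'a'::'m'::'p'::';'::X) = false :=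
    fun X => by simp [List.isPrefixOf]
  unfold pvChain
  rw [pvRep_cons_npre _ _ (n1 u),
    pvRep_cons_ne _ _ _ (by decide : 'a' ≠ '&'), pvRep_cons_ne _ _ _ (by decide : 'm' ≠ '&'),
    pvRep_cons_ne _ _ _ (by decide : 'p' ≠ '&'), pvRep_cons_ne _ _ _ (by decide : ';' ≠ '&'),
    pvRep_cons_npre _ _ (n2 _),
    pvRep_cons_ne _ _ _ (by decide : 'a' ≠ '&'), pvRep_cons_ne _ _ _ (by decide : 'm' ≠ '&'),
    pvRep_cons_ne _ _ _ (by decide : 'p' ≠ '&'), pvRep_cons_ne _ _ _ (by decide : ';' ≠ '&'),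
    pvRep_cons_npre _ _ (n3 _),
    pvRep_cons_ne _ _ _ (by decide : 'a' ≠ '&'), pvRep_cons_ne _ _ _ (by decide : 'm' ≠ '&'),
    pvRep_cons_ne _ _ _ (by decide : 'p' ≠ '&'), pvRep_cons_ne _ _ _ (by decide : ';' ≠ '&'),
    pvRep_cons_npre _ _ (n4 _),
    pvRep_cons_ne _ _ _ (by decide : 'a' ≠ '&'), pvRep_cons_ne _ _ _ (by decide : 'm' ≠ '&'),
    pvRep_cons_ne _ _ _ (by decide : 'p' ≠ '&'), pvRep_cons_ne _ _ _ (by decide : ';' ≠ '&'),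
    prefix5]

theorem chain_none (t : List Char)
    (h1 : List.isPrefixOf ['&','#','3','9',';'] ('&' :: t) = false)
    (h2 : List.isPrefixOf ['&','q','u','o','t',';'] ('&' :: t) = false)
    (h3 : List.isPrefixOf ['&','g','t',';'] ('&' :: t) = false)
    (h4 : List.isPrefixOf ['&','l','t',';'] ('&' :: t) = false)
    (h5 : List.isPrefixOf ['&','a','m','p',';'] ('&' :: t) = false) :
    pvChain ('&' :: t) = '&' :: pvChain t := by
  have g2 : List.isPrefixOf ['q','u','o','t',';'] t = false := by
    simpa [List.isPrefixOf] using h2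
  have g3 : List.isPrefixOf ['g','t',';'] t = false := by
    simpa [List.isPrefixOf] using h3
  have g4 : List.isPrefixOf ['l','t',';'] t = false := by
    simpa [List.isPrefixOf] using h4
  have g5 : List.isPrefixOf ['a','m','p',';'] t = false := by
    simpa [List.isPrefixOf] using h5
  have q2 := pvRep_pres ['#','3','9',';'] '\'' t _ (by decide) g2
  have q3 := pvRep_pres ['q','u','o','t',';'] '"' _ _ (by decide)
    (pvRep_pres ['#','3','9',';'] '\'' t _ (by decide) g3)
  have q4 := pvRep_pres ['g','t',';'] '>' _ _ (by decide)
    (pvRep_pres ['q','u','o','t',';'] '"' _ _ (by decide)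
      (pvRep_pres ['#','3','9',';'] '\'' t _ (by decide) g4))
  have q5 := pvRep_pres ['l','t',';'] '<' _ _ (by decide)
    (pvRep_pres ['g','t',';'] '>' _ _ (by decide)
      (pvRep_pres ['q','u','o','t',';'] '"' _ _ (by decide)
        (pvRep_pres ['#','3','9',';'] '\'' t _ (by decide) g5)))
  have m2 : List.isPrefixOf ['&','q','u','o','t',';']
      ('&' :: pvRep ['#','3','9',';'] ['\''] t) = false := by
    simp [List.isPrefixOf, q2]
  have m3 : List.isPrefixOf ['&','g','t',';']
      ('&' :: pvRep ['q','u','o','t',';'] ['"'] (pvRep ['#','3','9',';'] ['\''] t)) = false := by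
    simp [List.isPrefixOf, q3]
  have m4 : List.isPrefixOf ['&','l','t',';']
      ('&' :: pvRep ['g','t',';'] ['>'] (pvRep ['q','u','o','t',';'] ['"'] (pvRep ['#','3','9',';'] ['\''] t))) = false := by
    simp [List.isPrefixOf, q4]
  have m5 : List.isPrefixOf ['&','a','m','p',';']
      ('&' :: pvRep ['l','t',';'] ['<'] (pvRep ['g','t',';'] ['>'] (pvRep ['q','u','o','t',';'] ['"'] (pvRep ['#','3','9',';'] ['\''] t)))) = false := by
    simp [List.isPrefixOf, q5]
  unfold pvChain
  rw [pvRep_cons_npre _ _ h1, pvRep_cons_npre _ _ m2, pvRep_cons_npre _ _ m3,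
    pvRep_cons_npre _ _ m4, pvRep_cons_npre _ _ m5]

theorem pvChain_eq_pvDecode : ∀ l : List Char, pvChain l = pvDecode l := by
  suffices H : ∀ m, ∀ l : List Char, l.length ≤ m → pvChain l = pvDecode l from
    fun l => H l.length l le_rfl
  intro m
  induction m with
  | zero =>
    intro l hl
    have : l = [] := List.length_eq_zero_iff.mp (Nat.le_zero.mp hl)
    subst this
    unfold pvChain
    rw [pvDecode, pvRep_nil, pvRep_nil, pvRep_nil, pvRep_nil, pvRep_nil]
  | succ m ih =>
    intro l hl
    match l with
    | [] =>
      unfold pvChain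
      rw [pvDecode, pvRep_nil, pvRep_nil, pvRep_nil, pvRep_nil, pvRep_nil]
    | c :: t =>
      by_cases hc : c = '&'
      · subst hc
        rw [pvDecode_cons, if_pos rfl]
        rcases Bool.eq_false_or_eq_true (List.isPrefixOf ['&','#','3','9',';'] ('&' :: t)) with h1 | h1
        · obtain ⟨u, hu⟩ := List.isPrefixOf_iff_prefix.mp h1
          have ht : t = '#'::'3'::'9'::';'::u := by simpa using hu.symm
          subst ht
          rw [h1, if_pos rfl]
          have hd : ('#'::'3'::'9'::';'::u).drop 4 = u := by simp
          rw [hd, ← ih u (by simp at hl; omega)]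
          exact chain1 u
        rw [h1, if_neg Bool.false_ne_true]
        rcases Bool.eq_false_or_eq_true (List.isPrefixOf ['&','q','u','o','t',';'] ('&' :: t)) with h2 | h2
        · obtain ⟨u, hu⟩ := List.isPrefixOf_iff_prefix.mp h2
          have ht : t = 'q'::'u'::'o'::'t'::';'::u := by simpa using hu.symm
          subst ht
          rw [h2, if_pos rfl]
          have hd : ('q'::'u'::'o'::'t'::';'::u).drop 5 = u := by simp
          rw [hd, ← ih u (by simp at hl; omega)]
          exact chain2 u
        rw [h2, if_neg Bool.false_ne_true]
        rcases Bool.eq_false_or_eq_true (List.isPrefixOf ['&','g','t',';'] ('&' :: t)) with h3 | h3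
        · obtain ⟨u, hu⟩ := List.isPrefixOf_iff_prefix.mp h3
          have ht : t = 'g'::'t'::';'::u := by simpa using hu.symm
          subst ht
          rw [h3, if_pos rfl]
          have hd : ('g'::'t'::';'::u).drop 3 = u := by simp
          rw [hd, ← ih u (by simp at hl; omega)]
          exact chain3 u
        rw [h3, if_neg Bool.false_ne_true]
        rcases Bool.eq_false_or_eq_true (List.isPrefixOf ['&','l','t',';'] ('&' :: t)) with h4 | h4
        · obtain ⟨u, hu⟩ := List.isPrefixOf_iff_prefix.mp h4
          have ht : t = 'l'::'t'::';'::u := by simpa using hu.symm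
          subst ht
          rw [h4, if_pos rfl]
          have hd : ('l'::'t'::';'::u).drop 3 = u := by simp
          rw [hd, ← ih u (by simp at hl; omega)]
          exact chain4 u
        rw [h4, if_neg Bool.false_ne_true]
        rcases Bool.eq_false_or_eq_true (List.isPrefixOf ['&','a','m','p',';'] ('&' :: t)) with h5 | h5
        · obtain ⟨u, hu⟩ := List.isPrefixOf_iff_prefix.mp h5
          have ht : t = 'a'::'m'::'p'::';'::u := by simpa using hu.symm
          subst ht
          rw [h5, if_pos rfl]
          have hd : ('a'::'m'::'p'::';'::u).drop 4 = u := by simp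
          rw [hd, ← ih u (by simp at hl; omega)]
          exact chain5 u
        rw [h5, if_neg Bool.false_ne_true]
        rw [← ih t (by simp at hl; omega)]
        exact chain_none t h1 h2 h3 h4 h5
      · rw [pvDecode_cons, if_neg hc, ← ih t (by simp at hl; omega)]
        exact chain_cons_ne t hc

theorem lookup_mem_keys {α β : Type} [BEq α] [LawfulBEq α] (a : α) (l : List (α × β))
    (h : a ∈ l.map Prod.fst) : ∃ v, List.lookup a l = some v := by
  induction l with
  | nil => simp at h
  | cons p l ih =>
    obtain ⟨k, v⟩ := p
    by_cases hak : (a == k) = true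
    · exact ⟨v, by simp [List.lookup, hak]⟩
    · have hf : (a == k) = false := by simpa using hak
      have hm : a ∈ l.map Prod.fst := by
        simp only [List.map_cons, List.mem_cons] at h
        rcases h with h | h
        · exact absurd (by simp [h] : (a == k) = true) hak
        · exact h
      obtain ⟨w, hw⟩ := ih hm
      exact ⟨w, by simp [List.lookup, hf, hw]⟩

theorem chainA_eq (text : String) :
    PySem.Str.replace
      (PySem.Str.replace
        (PySem.Str.replace
          (PySem.Str.replace
            (PySem.Str.replace text "&#39;" "'")
            "&quot;" "\"")
          "&gt;" ">")
        "&lt;" "<")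
      "&amp;" "&" = String.ofList (pvChain text.toList) := by
  have e1 : ("&#39;" : String).toList = '&' :: ['#','3','9',';'] := by decide
  have e2 : ("&quot;" : String).toList = '&' :: ['q','u','o','t',';'] := by decide
  have e3 : ("&gt;" : String).toList = '&' :: ['g','t',';'] := by decide
  have e4 : ("&lt;" : String).toList = '&' :: ['l','t',';'] := by decide
  have e5 : ("&amp;" : String).toList = '&' :: ['a','m','p',';'] := by decide
  have f1 : ("'" : String).toList = ['\''] := by decide
  have f2 : ("\"" : String).toList = ['"'] := by decide
  have f3 : (">" : String).toList = ['>'] := by decide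
  have f4 : ("<" : String).toList = ['<'] := by decide
  have f5 : ("&" : String).toList = ['&'] := by decide
  simp only [PySem.Str.replace, String.toList_ofList, e1, e2, e3, e4, e5,
    f1, f2, f3, f4, f5, replace_eq_pvRep]
  rfl

-- ===== VERDICT (by name: the statement is the Claim_ definition above) =====
theorem html_decode_spec : Claim_equal_html_decode := by
  intro row_ tc _ hpre
  obtain ⟨text, hl⟩ := lookup_mem_keys tc row_ hpre
  unfold Spec_html_decode html_decode html_decode_alt
  rw [hl]
  dsimp only
  rw [chainA_eq, pvChain_eq_pvDecode]
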